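-- pv_equiv track=rewrite | github.com/nyangmyang/CCE_web | ansible_script.py | group_hosts_by_os
-- ===== SOURCE A (Python) =====
-- from typing import List, Dict
-- from collections import defaultdict
--
-- def group_hosts_by_os(host_list: List[Dict[str, str]]) -> Dict[str, List[Dict[str, str]]]:
--     """Group hosts by their OS type, extracting base OS from version strings."""
--     os_groups = defaultdict(list)
--
--     for host in host_list:
--         os_full = host.get('HOST_OS', 'else')
--
--         # Extract base OS type from full OS string (e.g., "Ubuntu 24.04" -> "ubuntu")
--         os_base = extract_base_os_type(os_full)
--
--         # Normalize OS names to standard categories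
--         if os_base in ['ubuntu', 'debian']:
--             os_type = 'Ubuntu'
--         elif os_base in ['centos', 'rhel', 'redhat', 'fedora', 'rocky', 'almalinux']:
--             os_type = 'CentOS'
--         elif os_base in ['windows', 'win']:
--             os_type = 'Windows'
--         else:
--             os_type = 'else'
--
--         # Update the host dict with normalized OS and keep original
--         host_copy = host.copy()
--         host_copy['HOST_OS_TYPE'] = os_type  # Normalized type for scripts
--         host_copy['HOST_OS_FULL'] = os_full  # Original full OS string
--         os_groups[os_type].append(host_copy)
--
--     return dict(os_groups)
--
-- def extract_base_os_type(os_string: str) -> str: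
--     """
--     Extract base OS type from full OS string.
--
--     Examples:
--         "Ubuntu 24.04" -> "ubuntu"
--         "CentOS 8.5" -> "centos"
--         "Windows Server 2019" -> "windows"
--         "Red Hat Enterprise Linux 9.2" -> "redhat"
--     """
--     if not os_string:
--         return 'else'
--
--     # Convert to lowercase and split by spaces
--     os_parts = os_string.lower().split()
--
--     if not os_parts:
--         return 'else'
--
--     first_word = os_parts[0]
--
--     # Handle special cases
--     if first_word == 'red' and len(os_parts) > 1 and os_parts[1] == 'hat':
--         return 'redhat'
--     elif first_word == 'windows':
--         return 'windows'
--     elif first_word in ['ubuntu', 'debian', 'centos', 'fedora', 'rocky', 'almalinux']: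
--         return first_word
--     elif 'rhel' in first_word or 'redhat' in first_word:
--         return 'redhat'
--     elif 'win' in first_word:
--         return 'windows'
--     else:
--         return 'else'
-- ===== SOURCE B (Python) =====
-- def _os_type(os_full):
--     """Classify a full OS string directly into its normalized group name."""
--     words = os_full.lower().split()
--     if not words:
--         return 'else'
--     w = words[0]
--     if w == 'red' and len(words) > 1 and words[1] == 'hat':
--         return 'CentOS'
--     if w in ('ubuntu', 'debian'):
--         return 'Ubuntu'
--     if w in ('centos', 'fedora', 'rocky', 'almalinux') or 'rhel' in w or 'redhat' in w:
--         return 'CentOS'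
--     if w == 'windows' or 'win' in w:
--         return 'Windows'
--     return 'else'
--
--
-- def _tag(host):
--     os_full = host.get('HOST_OS', 'else')
--     os_type = _os_type(os_full)
--     return os_type, {**host, 'HOST_OS_TYPE': os_type, 'HOST_OS_FULL': os_full}
--
--
-- def group_hosts_by_os(host_list):
--     """Group hosts by their OS type, extracting base OS from version strings."""
--     tagged = [_tag(host) for host in host_list]
--     order = []
--     for t, _ in tagged:
--         if t not in order:
--             order.append(t)
--     return {t: [h for tt, h in tagged if tt == t] for t in order}
-- ===== Notes on version B (the rewrite author's own statement) =====
-- stated objective: alternative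
-- what changed: B classifies each host in one map pass into (type, tagged-copy) pairs with a single direct classifier (no intermediate base-OS name), then builds the result by deduplicating the types in first-appearance order and filtering the tagged list once per type, instead of A's incremental defaultdict-append with a two-stage extract-then-normalize classification.
import Mathlib
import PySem

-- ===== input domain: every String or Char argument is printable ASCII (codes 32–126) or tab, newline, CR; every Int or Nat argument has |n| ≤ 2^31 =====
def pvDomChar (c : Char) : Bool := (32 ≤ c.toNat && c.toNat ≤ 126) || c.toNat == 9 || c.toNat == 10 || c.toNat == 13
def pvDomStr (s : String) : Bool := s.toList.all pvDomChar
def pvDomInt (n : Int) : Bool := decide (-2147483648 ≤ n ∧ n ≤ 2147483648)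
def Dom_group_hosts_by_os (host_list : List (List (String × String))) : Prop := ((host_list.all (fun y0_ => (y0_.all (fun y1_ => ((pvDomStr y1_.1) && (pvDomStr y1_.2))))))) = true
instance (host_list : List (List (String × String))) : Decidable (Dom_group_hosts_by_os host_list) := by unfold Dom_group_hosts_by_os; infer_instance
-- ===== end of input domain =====

-- B replaces A's extract-then-normalize classification by a direct one-step classifier and A's
-- incremental defaultdict-append grouping by a tag pass, a dedup of the types and one filter per
-- type (objective: alternative; equal return value, proved below).

-- ===== PORT A =====
-- extract_base_os_type, step for step ('len(os_parts) > 1 and os_parts[1] == "hat"' is exactly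
-- 'rest.headD "" = "hat"' since "" ≠ "hat").
def pvExtractBaseOsType (os_string : String) : String :=
  if os_string = "" then "else"
  else
    match PySem.Str.split₀ (PySem.Str.lower os_string) with
    | [] => "else"
    | first_word :: rest =>
      if first_word = "red" ∧ rest.headD "" = "hat" then "redhat"
      else if first_word = "windows" then "windows"
      else if first_word ∈ ["ubuntu", "debian", "centos", "fedora", "rocky", "almalinux"] then first_word
      else if PySem.Str.isIn "rhel" first_word ∨ PySem.Str.isIn "redhat" first_word then "redhat"
      else if PySem.Str.isIn "win" first_word then "windows"
      else "else"

-- the body of A's for-loop (one host processed into the accumulating dict)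
def pvStepA (os_groups : PySem.Dict String (List (List (String × String))))
    (host : List (String × String)) : PySem.Dict String (List (List (String × String))) :=
  let d := PySem.Dict.ofList host
  let os_full := d.getD "HOST_OS" "else"
  let os_base := pvExtractBaseOsType os_full
  let os_type :=
    if os_base ∈ ["ubuntu", "debian"] then "Ubuntu"
    else if os_base ∈ ["centos", "rhel", "redhat", "fedora", "rocky", "almalinux"] then "CentOS"
    else if os_base ∈ ["windows", "win"] then "Windows"
    else "else"
  let host_copy := ((d.insert "HOST_OS_TYPE" os_type).insert "HOST_OS_FULL" os_full).items
  os_groups.modify os_type [] (fun ys => ys ++ [host_copy])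

def group_hosts_by_os (host_list : List (List (String × String))) : List (String × List (List (String × String))) :=
  (host_list.foldl pvStepA PySem.Dict.empty).items

-- ===== PORT B =====
-- _os_type: direct classification into the group name (same headD transcription as in A's port).
def pvOsTypeB (os_full : String) : String :=
  match PySem.Str.split₀ (PySem.Str.lower os_full) with
  | [] => "else"
  | w :: rest =>
    if w = "red" ∧ rest.headD "" = "hat" then "CentOS"
    else if w ∈ ["ubuntu", "debian"] then "Ubuntu"
    else if w ∈ ["centos", "fedora", "rocky", "almalinux"] ∨ PySem.Str.isIn "rhel" w ∨ PySem.Str.isIn "redhat" w then "CentOS"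
    else if w = "windows" ∨ PySem.Str.isIn "win" w then "Windows"
    else "else"

-- _tag
def pvTagB (host : List (String × String)) : String × List (String × String) :=
  let d := PySem.Dict.ofList host
  let os_full := d.getD "HOST_OS" "else"
  let os_type := pvOsTypeB os_full
  (os_type, ((d.insert "HOST_OS_TYPE" os_type).insert "HOST_OS_FULL" os_full).items)

def group_hosts_by_os_alt (host_list : List (List (String × String))) : List (String × List (List (String × String))) :=
  let tagged := host_list.map pvTagB
  let order := PySem.Set.ofList (tagged.map (·.1))
  order.map (fun t => (t, (tagged.filter (fun p => p.1 == t)).map (·.2)))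

-- ===== PRECONDITION & SPEC =====
def Spec_group_hosts_by_os (host_list : List (List (String × String))) (out : List (String × List (List (String × String)))) : Prop := out = group_hosts_by_os_alt host_list
instance (host_list : List (List (String × String))) (out : List (String × List (List (String × String)))) : Decidable (Spec_group_hosts_by_os host_list out) := by unfold Spec_group_hosts_by_os; infer_instance

-- ===== CLAIM (what is proved, stated in full; the proofs are below) =====
def Claim_equal_group_hosts_by_os : Prop := ∀ (host_list : List (List (String × String))), Dom_group_hosts_by_os host_list → Spec_group_hosts_by_os host_list (group_hosts_by_os host_list)

-- ===== LEMMAS AND PROOFS =====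

-- A's normalize ∘ extract equals B's direct classifier on every string.
set_option maxHeartbeats 1000000 in
-- A's normalize ∘ extract equals B's direct classifier on every string.
theorem pvType_eq (s : String) :
    (if pvExtractBaseOsType s ∈ ["ubuntu", "debian"] then "Ubuntu"
     else if pvExtractBaseOsType s ∈ ["centos", "rhel", "redhat", "fedora", "rocky", "almalinux"] then "CentOS"
     else if pvExtractBaseOsType s ∈ ["windows", "win"] then "Windows"
     else "else") = pvOsTypeB s := by
  by_cases hs : s = ""
  · subst hs; decide
  · unfold pvExtractBaseOsType pvOsTypeB
    rw [if_neg hs]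
    cases h : PySem.Str.split₀ (PySem.Str.lower s) with
    | nil => decide
    | cons w rest =>
      show (if (if w = "red" ∧ rest.headD "" = "hat" then "redhat"
                else if w = "windows" then "windows"
                else if w ∈ ["ubuntu", "debian", "centos", "fedora", "rocky", "almalinux"] then w
                else if PySem.Str.isIn "rhel" w ∨ PySem.Str.isIn "redhat" w then "redhat"
                else if PySem.Str.isIn "win" w then "windows"
                else "else") ∈ ["ubuntu", "debian"] then "Ubuntu"
            else if (if w = "red" ∧ rest.headD "" = "hat" then "redhat"
                else if w = "windows" then "windows"
                else if w ∈ ["ubuntu", "debian", "centos", "fedora", "rocky", "almalinux"] then w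
                else if PySem.Str.isIn "rhel" w ∨ PySem.Str.isIn "redhat" w then "redhat"
                else if PySem.Str.isIn "win" w then "windows"
                else "else") ∈ ["centos", "rhel", "redhat", "fedora", "rocky", "almalinux"] then "CentOS"
            else if (if w = "red" ∧ rest.headD "" = "hat" then "redhat"
                else if w = "windows" then "windows"
                else if w ∈ ["ubuntu", "debian", "centos", "fedora", "rocky", "almalinux"] then w
                else if PySem.Str.isIn "rhel" w ∨ PySem.Str.isIn "redhat" w then "redhat"
                else if PySem.Str.isIn "win" w then "windows"
                else "else") ∈ ["windows", "win"] then "Windows"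
            else "else")
          = (if w = "red" ∧ rest.headD "" = "hat" then "CentOS"
             else if w ∈ ["ubuntu", "debian"] then "Ubuntu"
             else if w ∈ ["centos", "fedora", "rocky", "almalinux"] ∨ PySem.Str.isIn "rhel" w ∨ PySem.Str.isIn "redhat" w then "CentOS"
             else if w = "windows" ∨ PySem.Str.isIn "win" w then "Windows"
             else "else")
      by_cases h1 : w = "red" ∧ rest.headD "" = "hat"
      · rw [if_pos h1, if_pos h1]; simp
      · rw [if_neg h1, if_neg h1]
        by_cases h2 : w = "windows"
        · rw [if_pos h2]
          subst h2
          rw [if_neg (show ¬ ("windows" : String) ∈ (["ubuntu", "debian"] : List String) by decide),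
            if_neg (show ¬ (("windows" : String) ∈ (["centos", "fedora", "rocky", "almalinux"] : List String) ∨
                PySem.Str.isIn "rhel" "windows" = true ∨ PySem.Str.isIn "redhat" "windows" = true) by
              rintro (hm | hrh | hrdh)
              · exact absurd hm (by decide)
              · exact absurd hrh (by decide)
              · exact absurd hrdh (by decide)),
            if_pos (Or.inl (rfl : ("windows" : String) = "windows"))]
          simp
        · rw [if_neg h2]
          by_cases h3 : w ∈ (["ubuntu", "debian", "centos", "fedora", "rocky", "almalinux"] : List String)
          · rw [if_pos h3]
            simp only [List.mem_cons, List.not_mem_nil, or_false] at h3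
            rcases h3 with rfl | rfl | rfl | rfl | rfl | rfl <;> simp
          · rw [if_neg h3]
            have hb2 : ¬ w ∈ (["ubuntu", "debian"] : List String) := by
              intro hm
              simp only [List.mem_cons, List.not_mem_nil, or_false] at hm
              apply h3
              rcases hm with rfl | rfl
              · decide
              · decide
            have hm4 : ¬ w ∈ (["centos", "fedora", "rocky", "almalinux"] : List String) := by
              intro hm
              simp only [List.mem_cons, List.not_mem_nil, or_false] at hm
              apply h3
              rcases hm with rfl | rfl | rfl | rfl
              · decide
              · decide
              · decide
              · decide
            by_cases h4 : (PySem.Str.isIn "rhel" w = true) ∨ (PySem.Str.isIn "redhat" w = true)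
            · rw [if_pos h4, if_neg hb2, if_pos (Or.inr h4)]; simp
            · rw [if_neg h4]
              have hb3 : ¬ (w ∈ (["centos", "fedora", "rocky", "almalinux"] : List String) ∨
                  PySem.Str.isIn "rhel" w = true ∨ PySem.Str.isIn "redhat" w = true) :=
                fun hc => hc.elim hm4 h4
              by_cases h5 : PySem.Str.isIn "win" w = true
              · rw [if_pos h5, if_neg hb2, if_neg hb3, if_pos (Or.inr h5)]; simp
              · rw [if_neg h5, if_neg hb2, if_neg hb3, if_neg (show ¬ (w = "windows" ∨ PySem.Str.isIn "win" w = true) by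
                  rintro (rfl | hw)
                  · exact h5 (by decide)
                  · exact h5 hw)]
                simp

-- A's loop body equals B's tagging followed by the generic grouping step.
theorem pvStepA_eq (d : PySem.Dict String (List (List (String × String)))) (host : List (String × String)) :
    pvStepA d host = d.modify (pvTagB host).1 [] (fun ys => ys ++ [(pvTagB host).2]) := by
  simp only [pvStepA, pvTagB]
  rw [pvType_eq]

-- the defaultdict-append grouping loop, as items, is dedup-then-filter
theorem pvItemsGroup (l : List (String × List (String × String))) :
    ((l.foldl (fun d p => d.modify p.1 [] (fun ys => ys ++ [p.2])) PySem.Dict.empty).items :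
        List (String × List (List (String × String))))
    = (PySem.Set.ofList (l.map (·.1))).map
        (fun t => (t, (l.filter (fun p => p.1 == t)).map (·.2))) := by
  have hnd : (l.foldl (fun d p => d.modify p.1 [] (fun ys => ys ++ [p.2]))
      (PySem.Dict.empty : PySem.Dict String (List (List (String × String))))).keys.Nodup :=
    PySem.Dict.nodup_keys_foldl_modify_key l (fun p => p.1) [] (fun d p => fun ys => ys ++ [p.2])
      PySem.Dict.empty (by simp [PySem.Dict.keys_empty])
  rw [PySem.Dict.items_eq_map_keys _ hnd []]
  rw [PySem.Dict.keys_foldl_modify_key]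
  simp only [PySem.Dict.getD_foldl_modify_append, PySem.Dict.getD_empty, List.nil_append,
    PySem.Dict.keys_empty]
  rfl

-- ===== VERDICT (by name: the statement is the Claim_ definition above) =====
theorem group_hosts_by_os_spec : Claim_equal_group_hosts_by_os := by
  intro hl _
  show group_hosts_by_os hl = group_hosts_by_os_alt hl
  have h1 : hl.foldl pvStepA PySem.Dict.empty
      = (hl.map pvTagB).foldl (fun d p => d.modify p.1 [] (fun ys => ys ++ [p.2])) PySem.Dict.empty := by
    rw [List.foldl_map]
    apply PySem.List.foldl_congr_mem
    intro d host _
    exact pvStepA_eq d host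
  show (hl.foldl pvStepA PySem.Dict.empty).items = _
  rw [h1]
  exact pvItemsGroup (hl.map pvTagB)
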